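-- pv_equiv track=rewrite | github.com/suketsonwale/Python-Program | find intersection of two list.py | removeword
-- ===== SOURCE A (Python) =====
-- def removeword(word,remove,list1):
--     count = 0
--     index = 0
--     for i in list1:
--         index +=1
--         if word==i:
--             count+=1
--             if count == remove:
--                 list1.pop(index-1)
--     if count==0:
--         return False
--     else:
--         return True
-- ===== SOURCE B (Python) =====
-- def removeword(word, remove, list1):
--     # One pass collecting the indices of `word`, then a direct pop of the
--     # remove-th occurrence (A pops at most once, while the list is still
--     # unchanged, so the positions refer to the original list).
--     positions = [i for i, x in enumerate(list1) if x == word]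
--     if 1 <= remove <= len(positions):
--         list1.pop(positions[remove - 1])
--     return bool(positions)
-- ===== Notes on version B (the rewrite author's own statement) =====
-- stated objective: simpler
-- what changed: A interleaves counting, index bookkeeping and the pop inside one mutate-while-iterating loop; B collects the match positions in one comprehension, pops the remove-th position directly, and returns bool(positions).
import Mathlib
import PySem

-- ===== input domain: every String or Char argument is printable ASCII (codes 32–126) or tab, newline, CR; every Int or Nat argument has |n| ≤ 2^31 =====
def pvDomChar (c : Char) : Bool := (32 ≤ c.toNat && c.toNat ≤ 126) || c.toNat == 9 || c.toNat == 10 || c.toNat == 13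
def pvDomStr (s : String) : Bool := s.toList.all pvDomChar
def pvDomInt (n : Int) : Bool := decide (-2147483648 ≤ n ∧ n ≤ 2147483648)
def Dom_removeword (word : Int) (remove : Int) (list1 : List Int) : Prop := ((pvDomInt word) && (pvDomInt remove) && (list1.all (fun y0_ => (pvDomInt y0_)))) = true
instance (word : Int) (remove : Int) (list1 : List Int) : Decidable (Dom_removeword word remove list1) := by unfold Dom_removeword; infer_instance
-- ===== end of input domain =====

-- B replaces A's mutate-while-iterating scan by an index-collecting pass plus a direct pop; same return value (and same list mutation in Python; the Lean ports model the return value only).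


-- ===== PORT A =====
-- Python's `for i in list1` over a list that is popped mid-loop walks an internal
-- cursor over the CURRENT list; `index-1` always equals that cursor, so the pop
-- removes the current element.  Modelled by recursion on cursor j over the
-- current list xs (the pop is `List.eraseIdx`).
def removewordLoop (word : Int) (remove : Int) (xs : List Int) (j : Nat) (count : Int) : Int :=
  if h : j < xs.length then
    let i := xs[j]
    if word == i then
      if count + 1 == remove then
        removewordLoop word remove (xs.eraseIdx j) (j + 1) (count + 1)
      else
        removewordLoop word remove xs (j + 1) (count + 1)
    else
      removewordLoop word remove xs (j + 1) count
  else count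
termination_by xs.length - j
decreasing_by
  · simp [List.length_eraseIdx, h]; omega
  · omega
  · omega

def removeword (word : Int) (remove : Int) (list1 : List Int) : Bool :=
  if removewordLoop word remove list1 0 0 == 0 then false else true

-- ===== PORT B =====
-- positions = [i for i, x in enumerate(list1) if x == word]; the pop of
-- positions[remove-1] mutates list1 only and does not touch the return value,
-- which is bool(positions).
def removeword_alt (word : Int) (remove : Int) (list1 : List Int) : Bool :=
  let positions := ((PySem.List.enumerate list1).filter (fun p => p.2 == word)).map (fun p => p.1)
  !positions.isEmpty

-- ===== PRECONDITION & SPEC =====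
def Spec_removeword (word : Int) (remove : Int) (list1 : List Int) (out : Bool) : Prop := out = removeword_alt word remove list1
instance (word : Int) (remove : Int) (list1 : List Int) (out : Bool) : Decidable (Spec_removeword word remove list1 out) := by unfold Spec_removeword; infer_instance

-- ===== CLAIM (what is proved, stated in full; the proofs are below) =====
def Claim_equal_removeword : Prop := ∀ (word : Int) (remove : Int) (list1 : List Int), Dom_removeword word remove list1 → Spec_removeword word remove list1 (removeword word remove list1)

-- ===== LEMMAS AND PROOFS =====

lemma removewordLoop_ne_zero (word remove : Int) (xs : List Int) (j : Nat) (count : Int)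
    (hc : 0 ≤ count) :
    (removewordLoop word remove xs j count ≠ 0 ↔ count ≠ 0 ∨ (xs.drop j).contains word) := by
  induction xs, j, count using removewordLoop.induct word remove with
  | case1 xs j count h i hw hr ih =>
    have hw' : (word == xs[j]) = true := hw
    rw [removewordLoop]
    simp only [h, dif_pos, hw', if_true, hr]
    rw [ih (by omega)]
    have hd : xs.drop j = xs[j] :: xs.drop (j + 1) := List.drop_eq_getElem_cons h
    constructor
    · intro _; right
      have hm : xs[j] ∈ List.drop j xs := by rw [hd]; exact List.mem_cons_self ..
      rw [beq_iff_eq.mp hw']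
      simpa using hm
    · intro _; left; omega
  | case2 xs j count h i hw hr ih =>
    have hw' : (word == xs[j]) = true := hw
    rw [removewordLoop]
    simp only [h, dif_pos, hw', if_true, hr, Bool.false_eq_true, if_false]
    rw [ih (by omega)]
    have hd : xs.drop j = xs[j] :: xs.drop (j + 1) := List.drop_eq_getElem_cons h
    constructor
    · intro _; right
      have hm : xs[j] ∈ List.drop j xs := by rw [hd]; exact List.mem_cons_self ..
      rw [beq_iff_eq.mp hw']
      simpa using hm
    · intro _; left; omega
  | case3 xs j count h i hw ih =>
    have hw' : ¬ ((word == xs[j]) = true) := hw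
    rw [removewordLoop]
    simp only [h, dif_pos, if_neg hw']
    rw [ih hc]
    have hd : xs.drop j = xs[j] :: xs.drop (j + 1) := List.drop_eq_getElem_cons h
    rw [hd]
    simp only [List.contains_cons]
    have : (word == xs[j]) = false := by simpa using hw'
    rw [this]; simp
  | case4 xs j count h =>
    rw [removewordLoop]
    simp [h, List.drop_eq_nil_of_le (by omega : xs.length ≤ j)]

lemma alt_eq_contains (word remove : Int) (list1 : List Int) :
    removeword_alt word remove list1 = list1.contains word := by
  unfold removeword_alt
  have key : ∀ (s : Int) (l : List Int),
      ((((PySem.List.enumerate l s).filter (fun p => p.2 == word)).map (fun p => p.1)).isEmpty)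
        = !(l.contains word) := by
    intro s l
    induction l generalizing s with
    | nil => simp [PySem.List.enumerate_nil]
    | cons x xs ih =>
      rw [PySem.List.enumerate_cons]
      by_cases hx : x == word
      · simp [beq_iff_eq.mp hx]
      · simp only [List.filter_cons, hx, if_neg, Bool.false_eq_true, not_false_iff, ih,
          List.contains_cons]
        have : (word == x) = false := by
          simp only [Bool.not_eq_true, beq_eq_false_iff_ne] at hx ⊢
          exact fun h => hx h.symm
        simp [this]
  simp [key 0 list1]

-- ===== VERDICT (by name: the statement is the Claim_ definition above) =====
theorem removeword_spec : Claim_equal_removeword := by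
  intro word remove list1 _
  unfold Spec_removeword removeword
  rw [alt_eq_contains]
  have h := removewordLoop_ne_zero word remove list1 0 0 le_rfl
  simp only [List.drop_zero] at h
  by_cases hz : removewordLoop word remove list1 0 0 = 0
  · simp only [hz, beq_self_eq_true, if_pos]
    by_contra hc
    simp at hc
    have := h.mpr (Or.inr (by simpa using hc))
    exact this hz
  · have : (removewordLoop word remove list1 0 0 == 0) = false := by simpa using hz
    rw [this]
    simp only [Bool.false_eq_true, if_neg, not_false_iff]
    have := h.mp hz
    rcases this with h0 | hmem
    · omega
    · simpa using hmem.symm
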